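-- pv_equiv track=rewrite | github.com/Fuhao064/docx_format_check | backend/editors/format_fixer.py | _group_errors_by_paragraph
-- ===== SOURCE A (Python) =====
-- from typing import Dict, List, Optional, Union, Tuple, Any
--
-- def _group_errors_by_paragraph(errors: List[Dict]) -> Dict[str, List[Dict]]:
--     """
--     按段落分组错误
--
--     Args:
--         errors: 错误列表
--
--     Returns:
--         Dict[str, List[Dict]]: 按段落分组的错误字典
--     """
--     errors_by_para = {}
--
--     for error in errors:
--         location = error.get('location', '')
--         if '.' in location:
--             # 提取段落内容的前几个字作为标识
--             para_identifier = location.split('.', 1)[1].strip()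
--
--             if para_identifier not in errors_by_para:
--                 errors_by_para[para_identifier] = []
--
--             errors_by_para[para_identifier].append(error)
--
--     return errors_by_para
-- ===== SOURCE B (Python) =====
-- from typing import Dict, List
--
--
-- def _group_errors_by_paragraph(errors: List[Dict]) -> Dict[str, List[Dict]]:
--     # Two-pass grouping: first project to (identifier, error) pairs, then build
--     # the result as ordered distinct keys, each with a filter over the pairs.
--     pairs = []
--     for error in errors:
--         location = error.get('location', '')
--         if '.' in location:
--             pairs.append((location.split('.', 1)[1].strip(), error))
--     keys = dict.fromkeys(k for k, _ in pairs)
--     return {k: [e for i, e in pairs if i == k] for k in keys}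
-- ===== Notes on version B (the rewrite author's own statement) =====
-- stated objective: alternative
-- what changed: A builds the grouped dict in one pass by scattering each error into a conditionally-seeded dict entry; B makes two passes: it first projects errors to (identifier, error) pairs, then takes the ordered distinct identifiers (dict.fromkeys) and builds each group by filtering the pair list per key.
import Mathlib
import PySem

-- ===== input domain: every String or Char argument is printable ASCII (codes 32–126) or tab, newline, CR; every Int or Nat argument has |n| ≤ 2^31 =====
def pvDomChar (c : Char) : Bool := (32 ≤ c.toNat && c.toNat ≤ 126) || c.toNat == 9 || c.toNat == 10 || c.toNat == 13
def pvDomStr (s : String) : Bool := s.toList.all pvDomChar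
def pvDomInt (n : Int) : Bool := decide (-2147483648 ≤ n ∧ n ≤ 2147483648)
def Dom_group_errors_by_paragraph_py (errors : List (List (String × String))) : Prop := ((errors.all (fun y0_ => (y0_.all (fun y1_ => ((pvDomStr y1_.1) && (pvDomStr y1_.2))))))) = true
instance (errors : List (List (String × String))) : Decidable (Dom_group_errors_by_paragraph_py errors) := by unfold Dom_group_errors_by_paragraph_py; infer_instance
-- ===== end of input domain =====

-- B replaces A's one-pass dict scatter by a two-pass keys-then-filter grouping (alternative decomposition, same return value).

-- ===== PORT A =====
-- Shared helper: both Source A and Source B compute the paragraph identifier with the literal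
-- expression  location.split('.', 1)[1].strip()  guarded by  '.' in location ,
-- with location = error.get('location', '').  The [1] index is in range whenever the
-- guard holds (split on a contained separator yields ≥ 2 parts), so .getD is exact here.
def pvLocKey? (error : List (String × String)) : Option String :=
  let location := (PySem.Dict.mk error).getD "location" ""
  if PySem.Str.isIn "." location then
    some (PySem.Str.strip (((PySem.Str.splitMax? location "." 1).getD []).getD 1 ""))
  else none

-- one iteration of A's for-loop: conditionally seed the key with [], then append
def pvStepA (d : PySem.Dict String (List (List (String × String))))
    (error : List (String × String)) : PySem.Dict String (List (List (String × String))) :=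
  match pvLocKey? error with
  | none => d
  | some k =>
    let d1 := if d.contains k then d else d.insert k []
    d1.modify k [] (fun v => v ++ [error])

def group_errors_by_paragraph_py (errors : List (List (String × String))) :
    List (String × List (List (String × String))) :=
  (errors.foldl pvStepA PySem.Dict.empty).items

-- ===== PORT B =====
-- pass 1 of Source B: the list of (identifier, error) pairs
def pvPairs (errors : List (List (String × String))) :
    List (String × List (String × String)) :=
  errors.filterMap (fun error => (pvLocKey? error).map (fun k => (k, error)))

-- pass 2 of Source B: dict.fromkeys ordered dedup, then one filter per key
def group_errors_by_paragraph_py_alt (errors : List (List (String × String))) :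
    List (String × List (List (String × String))) :=
  let pairs := pvPairs errors
  (PySem.List.dedup (pairs.map Prod.fst)).map
    (fun k => (k, (pairs.filter (fun p => p.1 == k)).map Prod.snd))

-- ===== PRECONDITION & SPEC =====
def Spec_group_errors_by_paragraph_py (errors : List (List (String × String))) (out : List (String × List (List (String × String)))) : Prop := out = group_errors_by_paragraph_py_alt errors
instance (errors : List (List (String × String))) (out : List (String × List (List (String × String)))) : Decidable (Spec_group_errors_by_paragraph_py errors out) := by unfold Spec_group_errors_by_paragraph_py; infer_instance

-- ===== CLAIM (what is proved, stated in full; the proofs are below) =====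
def Claim_equal_group_errors_by_paragraph_py : Prop := ∀ (errors : List (List (String × String))), Dom_group_errors_by_paragraph_py errors → Spec_group_errors_by_paragraph_py errors (group_errors_by_paragraph_py errors)

-- ===== LEMMAS AND PROOFS =====

-- B's grouping, as a function of the pair list (this is the body of the port of B)
def pvGroup (ps : List (String × List (String × String))) :
    List (String × List (List (String × String))) :=
  (PySem.List.dedup (ps.map Prod.fst)).map
    (fun k => (k, (ps.filter (fun p => p.1 == k)).map Prod.snd))

-- A's loop step, re-indexed by the (key, error) pair
def pvStepP (d : PySem.Dict String (List (List (String × String))))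
    (p : String × List (String × String)) : PySem.Dict String (List (List (String × String))) :=
  let d1 := if d.contains p.1 then d else d.insert p.1 []
  d1.modify p.1 [] (fun v => v ++ [p.2])

theorem pvFoldA_eq_foldP (errors : List (List (String × String)))
    (d : PySem.Dict String (List (List (String × String)))) :
    errors.foldl pvStepA d = (pvPairs errors).foldl pvStepP d := by
  induction errors generalizing d with
  | nil => rfl
  | cons e t ih =>
    simp only [pvPairs, List.filterMap_cons, List.foldl_cons]
    cases h : pvLocKey? e with
    | none =>
      simpa [pvStepA, h, pvPairs] using ih d
    | some k =>
      simpa [pvStepA, pvStepP, h, pvPairs] using ih _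

theorem pvFind?_map_diag {β : Type} (g : String → β) (l : List String) (k : String) :
    (l.map (fun x => (x, g x))).find? (fun p => p.1 == k)
      = if k ∈ l then some (k, g k) else none := by
  induction l with
  | nil => simp
  | cons a t ih =>
    by_cases hak : a = k
    · subst hak; simp [List.find?]
    · have h1 : (a == k) = false := by simpa using hak
      have h2 : ¬ k = a := fun h => hak h.symm
      simp [List.find?, h1, ih, h2]

theorem pvMem_dedup (xs : List String) (k : String) :
    k ∈ PySem.List.dedup xs ↔ k ∈ xs :=
  PySem.Set.mem_ofList xs k

theorem pvDedup_append (xs : List String) (k : String) :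
    PySem.List.dedup (xs ++ [k])
      = if k ∈ xs then PySem.List.dedup xs else PySem.List.dedup xs ++ [k] := by
  have h1 : PySem.List.dedup (xs ++ [k]) = PySem.Set.add (PySem.List.dedup xs) k := by
    show PySem.Set.ofList (xs ++ [k]) = _
    rw [PySem.Set.ofList_eq_foldl, List.foldl_append, List.foldl_cons, List.foldl_nil,
      ← PySem.Set.ofList_eq_foldl]
    rfl
  rw [h1]
  cases hcon : PySem.Set.contains (PySem.List.dedup xs) k with
  | true =>
    have hm : k ∈ xs := (pvMem_dedup xs k).1 ((PySem.Set.contains_iff _ k).1 hcon)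
    simp only [PySem.Set.add, hcon, if_true, hm]
  | false =>
    have hm : k ∉ xs := by
      intro h
      have := (PySem.Set.contains_iff (PySem.List.dedup xs) k).2 ((pvMem_dedup xs k).2 h)
      rw [hcon] at this; cases this
    simp only [PySem.Set.add, hcon, Bool.false_eq_true, if_false, hm, if_neg hm]

theorem pvContains_mk_group (ps : List (String × List (String × String))) (k : String) :
    (PySem.Dict.mk (pvGroup ps)).contains k = true ↔ k ∈ ps.map Prod.fst := by
  show (pvGroup ps).any (fun p => p.1 == k) = true ↔ _
  rw [List.any_eq_true]
  constructor
  · rintro ⟨p, hp, hbeq⟩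
    simp only [pvGroup, List.mem_map] at hp
    rcases hp with ⟨k', hk', rfl⟩
    have : k' = k := by simpa using hbeq
    exact (pvMem_dedup _ _).1 (this ▸ hk')
  · intro hkmem
    refine ⟨(k, (ps.filter (fun p => p.1 == k)).map Prod.snd), ?_, by simp⟩
    simp only [pvGroup, List.mem_map]
    exact ⟨k, (pvMem_dedup _ _).2 hkmem, rfl⟩

theorem pvGet?_mk_group (ps : List (String × List (String × String))) (k : String) :
    (PySem.Dict.mk (pvGroup ps)).get? k
      = if k ∈ ps.map Prod.fst
          then some ((ps.filter (fun p => p.1 == k)).map Prod.snd)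
          else none := by
  show Option.map (fun x => x.2) ((pvGroup ps).find? (fun p => p.1 == k)) = _
  unfold pvGroup
  rw [pvFind?_map_diag]
  by_cases hk : k ∈ ps.map Prod.fst
  · rw [if_pos ((pvMem_dedup _ _).2 hk), if_pos hk]; rfl
  · rw [if_neg (fun h => hk ((pvMem_dedup _ _).1 h)), if_neg hk]; rfl

-- the key step: one pvStepP on the grouped prefix is the grouping of the extended pair list
theorem pvStep_group (ps : List (String × List (String × String)))
    (k : String) (e : List (String × String)) :
    (pvStepP (PySem.Dict.mk (pvGroup ps)) (k, e)).items = pvGroup (ps ++ [(k, e)]) := by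
  by_cases hk : k ∈ ps.map Prod.fst
  · -- key already present: modify rewrites the existing entry in place
    have hc : (PySem.Dict.mk (pvGroup ps)).contains k = true := (pvContains_mk_group ps k).2 hk
    have hgd : (PySem.Dict.mk (pvGroup ps)).getD k []
        = (ps.filter (fun p => p.1 == k)).map Prod.snd := by
      rw [PySem.Dict.getD, pvGet?_mk_group, if_pos hk]; rfl
    have hmod : pvStepP (PySem.Dict.mk (pvGroup ps)) (k, e)
        = (PySem.Dict.mk (pvGroup ps)).insert k
            ((ps.filter (fun p => p.1 == k)).map Prod.snd ++ [e]) := by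
      simp only [pvStepP, hc, if_true, PySem.Dict.modify, hgd]
    rw [hmod, PySem.Dict.items_insert_of_contains _ _ hc]
    show (pvGroup ps).map _ = _
    unfold pvGroup
    rw [List.map_append, List.map_cons, List.map_nil, pvDedup_append, if_pos hk, List.map_map]
    apply List.map_congr_left
    intro k' hk'
    by_cases hkk : k' = k
    · subst hkk
      simp [List.filter_append]
    · have hne : (k' == k) = false := by simpa using hkk
      have hne' : (k == k') = false := by simpa using fun h => hkk h.symm
      simp [Function.comp, hne, hne', List.filter_append]
  · -- fresh key: seeded with [], appended, so it lands at the end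
    have hc : (PySem.Dict.mk (pvGroup ps)).contains k = false := by
      rw [Bool.eq_false_iff]
      exact fun h => hk ((pvContains_mk_group ps k).1 h)
    have hitems1 : ((PySem.Dict.mk (pvGroup ps)).insert k []).items = pvGroup ps ++ [(k, [])] :=
      PySem.Dict.items_insert_of_not_contains _ _ hc
    have hc1 : ((PySem.Dict.mk (pvGroup ps)).insert k []).contains k = true :=
      PySem.Dict.contains_insert_self _ _ _
    have hgd1 : ((PySem.Dict.mk (pvGroup ps)).insert k []).getD k [] = [] := by
      rw [PySem.Dict.getD, PySem.Dict.get?_insert_self]; rfl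
    have hmod : pvStepP (PySem.Dict.mk (pvGroup ps)) (k, e)
        = ((PySem.Dict.mk (pvGroup ps)).insert k []).insert k ([] ++ [e]) := by
      simp only [pvStepP, hc, Bool.false_eq_true, if_false, PySem.Dict.modify, hgd1]
    have hnilfilter : ps.filter (fun p => p.1 == k) = [] := by
      rw [List.filter_eq_nil_iff]
      intro p hp
      simp only [beq_iff_eq]
      exact fun h => hk (List.mem_map.2 ⟨p, hp, h⟩)
    have hold : (pvGroup ps).map
        (fun p => if p.1 == k then (k, [] ++ [e]) else p) = pvGroup ps := by
      have h := List.map_congr_left (l := pvGroup ps)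
        (g := id) (f := fun p => if p.1 == k then (k, [] ++ [e]) else p) ?_
      · simpa using h
      · intro p hp
        simp only [pvGroup, List.mem_map] at hp
        rcases hp with ⟨k', hk', rfl⟩
        have hne : (k' == k) = false := by
          simp only [beq_eq_false_iff_ne, ne_eq]
          exact fun h => hk (h ▸ (pvMem_dedup _ _).1 hk')
        simp [hne]
    rw [hmod, PySem.Dict.items_insert_of_contains _ _ hc1, hitems1, List.map_append, hold]
    show pvGroup ps ++ _ = _
    unfold pvGroup
    simp only [List.map_append, List.map_cons, List.map_nil, beq_self_eq_true, if_true]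
    rw [pvDedup_append, if_neg hk, List.map_append]
    congr 1
    · apply List.map_congr_left
      intro k' hk'
      have hne' : (k == k') = false := by
        simp only [beq_eq_false_iff_ne, ne_eq]
        exact fun h => hk (h ▸ (pvMem_dedup _ _).1 hk')
      simp [List.filter_append, hne']
    · simp [List.filter_append, hnilfilter]

theorem pvFoldP_group (ps : List (String × List (String × String))) :
    ps.foldl pvStepP PySem.Dict.empty = PySem.Dict.mk (pvGroup ps) := by
  induction ps using List.reverseRecOn with
  | nil => rfl
  | append_singleton t p ih =>
    rw [List.foldl_append, List.foldl_cons, List.foldl_nil, ih]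
    apply PySem.Dict.ext
    obtain ⟨k, e⟩ := p
    exact pvStep_group t k e

-- ===== VERDICT (by name: the statement is the Claim_ definition above) =====
theorem group_errors_by_paragraph_py_spec : Claim_equal_group_errors_by_paragraph_py := by
  intro errors _
  unfold Spec_group_errors_by_paragraph_py
  show (errors.foldl pvStepA PySem.Dict.empty).items = _
  rw [pvFoldA_eq_foldP, pvFoldP_group]
  rfl
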